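-- pv_equiv track=rewrite | github.com/WillJRoper/dir-wand | src/dir_wand/swapfile.py | get_swap_combos
-- ===== SOURCE A (Python) =====
-- import itertools
--
-- def all_combinations(swaps):
--     """
--     Get all combinations of the swaps.
--
--     Args:
--         swaps (dict):
--             The swaps to get the combinations for.
--
--     Yields:
--         dict:
--             The next combination of swaps.
--     """
--     # Extract keys and value lists
--     keys = list(swaps.keys())
--     value_lists = [swaps[key] for key in keys]
--
--     # Use product to get all combinations
--     for combination in itertools.product(*value_lists):
--         # Zip the combination values back with their keys
--         yield dict(zip(keys, combination))
--
-- def get_swap_combos(swaps):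
--     """
--     Get the swap combinations.
--
--     Args:
--         swaps (dict):
--             The swaps to get the combinations for.
--
--     Returns:
--         list:
--             A list of all the swap combinations.
--     """
--     # Combine each combination into a single dictionary with an entry for each
--     # placeholder
--     transposed = {}
--     for combo in all_combinations(swaps):
--         for key in combo:
--             if key not in transposed:
--                 transposed[key] = {"list": []}  # "list" for yaml structure
--             transposed[key]["list"].append(combo[key])
--
--     return transposed
-- ===== SOURCE B (Python) =====
-- def get_swap_combos(swaps):
--     """Closed-form transpose of the Cartesian product: per key, repeat/tile its
--     value list instead of enumerating every combination."""
--     keys = list(swaps.keys())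
--     value_lists = [swaps[key] for key in keys]
--     total = 1
--     for vl in value_lists:
--         total *= len(vl)
--     if total == 0 or not keys:
--         return {}
--     out = {}
--     repeat_each = total
--     tile = 1
--     for key, vl in zip(keys, value_lists):
--         repeat_each //= len(vl)
--         column = [v for _ in range(tile) for v in vl for _ in range(repeat_each)]
--         out[key] = {"list": column}
--         tile *= len(vl)
--     return out
-- ===== Notes on version B (the rewrite author's own statement) =====
-- stated objective: faster
-- what changed: Instead of enumerating every combination of itertools.product and appending each value to its key's list, B computes each key's column in closed form (value list with each element repeated by the product of later list lengths, tiled by the product of earlier lengths), returning {} when any list is empty or there are no keys.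
import Mathlib
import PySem

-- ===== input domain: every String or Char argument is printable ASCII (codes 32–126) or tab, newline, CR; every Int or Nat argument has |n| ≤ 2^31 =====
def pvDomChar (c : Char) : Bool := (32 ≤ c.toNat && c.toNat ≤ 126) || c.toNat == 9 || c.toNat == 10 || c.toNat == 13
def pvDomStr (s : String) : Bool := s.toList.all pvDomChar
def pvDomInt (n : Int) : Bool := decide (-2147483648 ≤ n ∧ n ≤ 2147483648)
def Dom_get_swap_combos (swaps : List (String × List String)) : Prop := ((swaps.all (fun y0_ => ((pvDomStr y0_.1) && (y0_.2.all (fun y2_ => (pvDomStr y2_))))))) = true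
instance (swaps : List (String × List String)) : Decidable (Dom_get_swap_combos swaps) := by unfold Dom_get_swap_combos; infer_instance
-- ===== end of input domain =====

-- B replaces A's enumeration of the whole Cartesian product (appending one value per
-- combination) by a closed-form repeat/tile construction of each key's column; same
-- return value, no per-combination dict construction.

-- ===== PORT A =====
-- itertools.product(*value_lists): leftmost factor varies slowest
def pvProd (ls : List (List String)) : List (List String) :=
  match ls with
  | [] => [[]]
  | l :: rest => l.flatMap (fun x => (pvProd rest).map (fun c => x :: c))

-- Python-dict primitives on association lists (first-match lookup, in-place update);
-- exact for dicts, whose keys are distinct.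
def pvContains {α : Type} (t : List (String × α)) (k : String) : Bool :=
  t.any (fun p => p.1 == k)

def pvModify {α : Type} (t : List (String × α)) (k : String) (f : α → α) : List (String × α) :=
  match t with
  | [] => []
  | p :: rest => if p.1 == k then (p.1, f p.2) :: rest else p :: pvModify rest k f

-- the body of A's inner loop: one (key, combo[key]) pair
def pvStep1 (t : List (String × List (String × List String))) (kv : String × String) :
    List (String × List (String × List String)) :=
  let t' := if pvContains t kv.1 then t else t ++ [(kv.1, [("list", ([] : List String))])]
  pvModify t' kv.1 (fun d => pvModify d "list" (fun l => l ++ [kv.2]))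

-- for combo in all_combinations(swaps): for key in combo: …
-- (combo = dict(zip(keys, combination)); iterating a dict yields its pairs in order)
def get_swap_combos (swaps : List (String × List String)) : List (String × List (String × List String)) :=
  ((pvProd (swaps.map Prod.snd)).map (fun c => (swaps.map Prod.fst).zip c)).foldl
    (fun t combo => combo.foldl pvStep1 t) []

-- ===== PORT B =====
-- state of Source B's loop: (repeat_each, tile, out)
def pvStepB (st : Nat × Nat × List (String × List (String × List String))) (kv : String × List String) :
    Nat × Nat × List (String × List (String × List String)) :=
  let rep := st.1 / kv.2.length
  -- [v for _ in range(tile) for v in vl for _ in range(repeat_each)]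
  let column := (List.range st.2.1).flatMap (fun _ => kv.2.flatMap (fun v => (List.range rep).map (fun _ => v)))
  -- out[key] = {"list": column}: assignment of a fresh key appends (keys of a dict are distinct)
  (rep, st.2.1 * kv.2.length, st.2.2 ++ [(kv.1, [("list", column)])])

-- keys, value_lists and total are written inline (keys = swaps.map Prod.fst,
-- value_lists = swaps.map Prod.snd, total = their length product)
def get_swap_combos_alt (swaps : List (String × List String)) : List (String × List (String × List String)) :=
  if (swaps.map Prod.snd).foldl (fun a l => a * l.length) 1 = 0 ∨ swaps.map Prod.fst = [] then []
  else (((swaps.map Prod.fst).zip (swaps.map Prod.snd)).foldl pvStepB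
    ((swaps.map Prod.snd).foldl (fun a l => a * l.length) 1, 1, [])).2.2

-- ===== PRECONDITION & SPEC =====
-- Pre_ excludes association lists with duplicate keys: the Python argument is a dict,
-- which cannot hold duplicate keys, so A's behaviour there is an artefact of the encoding.
def Pre_get_swap_combos (swaps : List (String × List String)) : Prop :=
  (swaps.map Prod.fst).Nodup
instance (swaps : List (String × List String)) : Decidable (Pre_get_swap_combos swaps) := by
  unfold Pre_get_swap_combos; infer_instance

def pvWitness_get_swap_combos : (List (String × List String)) :=
  [("a", ["1", "2"]), ("b", ["x"])]

def Spec_get_swap_combos (swaps : List (String × List String)) (out : List (String × List (String × List String))) : Prop := out = get_swap_combos_alt swaps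
instance (swaps : List (String × List String)) (out : List (String × List (String × List String))) : Decidable (Spec_get_swap_combos swaps out) := by unfold Spec_get_swap_combos; infer_instance

-- ===== CLAIM (what is proved, stated in full; the proofs are below) =====
def Claim_equal_get_swap_combos : Prop := ∀ (swaps : List (String × List String)), Dom_get_swap_combos swaps → Pre_get_swap_combos swaps → Spec_get_swap_combos swaps (get_swap_combos swaps)

-- ===== LEMMAS AND PROOFS =====

-- (k, [("list", col)]) rows for a list of keys and their columns
def pvMk (keys : List String) (cols : List (List String)) : List (String × List (String × List String)) :=
  List.zipWith (fun k col => (k, [("list", col)])) keys cols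

-- appending one combination to every column
def pvUpd (cols : List (List String)) (c : List String) : List (List String) :=
  List.zipWith (fun col v => col ++ [v]) cols c

-- the columns of the transposed product, recursively
def pvColA : List (List String) → List (List String)
  | [] => []
  | l :: ls =>
      (l.flatMap (fun x => List.replicate (pvProd ls).length x)) ::
        (pvColA ls).map (fun col => l.flatMap (fun _ => col))

-- product of the list lengths
def pvPL (ls : List (List String)) : Nat := (ls.map List.length).prod

-- B's output rows from a suffix of swaps, given the accumulated tile
def pvMkB : List (String × List String) → Nat → List (String × List (String × List String))
  | [], _ => []
  | (k, l) :: sw, tile =>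
      (k, [("list", (List.replicate tile ()).flatMap
          (fun _ => l.flatMap (fun v => List.replicate (pvPL (sw.map Prod.snd)) v)))]) ::
        pvMkB sw (tile * l.length)

theorem pvProd_length (ls : List (List String)) : (pvProd ls).length = pvPL ls := by
  induction ls with
  | nil => simp [pvProd, pvPL]
  | cons l rest ih =>
    simp [pvProd, pvPL, List.length_flatMap, ih, List.map_const', List.sum_replicate,
      smul_eq_mul]

theorem pvProd_mem_length {ls : List (List String)} {c : List String} (h : c ∈ pvProd ls) :
    c.length = ls.length := by
  induction ls generalizing c with
  | nil =>
    simp [pvProd] at h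
    subst h; rfl
  | cons l rest ih =>
    simp [pvProd, List.mem_flatMap, List.mem_map] at h
    obtain ⟨x, hx, a, ha, rfl⟩ := h
    simp [ih ha]

theorem pvColA_length (ls : List (List String)) : (pvColA ls).length = ls.length := by
  induction ls with
  | nil => simp [pvColA]
  | cons l rest ih => simp [pvColA, ih]

theorem pvContains_append {α : Type} (t u : List (String × α)) (k : String) :
    pvContains (t ++ u) k = (pvContains t k || pvContains u k) := by
  simp [pvContains, List.any_append]

theorem pvModify_append {α : Type} (t u : List (String × α)) (k : String) (f : α → α)
    (h : pvContains t k = false) : pvModify (t ++ u) k f = t ++ pvModify u k f := by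
  induction t with
  | nil => simp
  | cons p t ih =>
    simp only [pvContains, List.any_cons, Bool.or_eq_false_iff] at h
    have h2 : pvContains t k = false := h.2
    simp [pvModify, h.1, ih h2]

-- L0: first combination, all keys fresh
theorem pvFold_fresh (keys : List String) (c : List String)
    (t₀ : List (String × List (String × List String)))
    (hn : keys.Nodup) (hlen : c.length = keys.length)
    (hfresh : ∀ k ∈ keys, pvContains t₀ k = false) :
    (keys.zip c).foldl pvStep1 t₀ = t₀ ++ pvMk keys (c.map (fun v => [v])) := by
  induction keys generalizing c t₀ with
  | nil => simp [pvMk]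
  | cons k ks ih =>
    cases c with
    | nil => simp at hlen
    | cons v vs =>
      have hk : pvContains t₀ k = false := hfresh k (by simp)
      have hstep : pvStep1 t₀ (k, v) = t₀ ++ [(k, [("list", [v])])] := by
        unfold pvStep1
        simp only [hk, Bool.false_eq_true, if_false]
        rw [pvModify_append _ _ _ _ hk]
        simp [pvModify]
      rw [List.zip_cons_cons, List.foldl_cons, hstep]
      rw [ih vs (t₀ ++ [(k, [("list", [v])])]) (List.nodup_cons.mp hn).2
        (by simpa using hlen) ?fresh]
      · simp [pvMk, List.append_assoc]
      case fresh =>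
        intro k' hk'
        have hne : k' ≠ k := fun h => (List.nodup_cons.mp hn).1 (h ▸ hk')
        rw [pvContains_append, hfresh k' (List.mem_cons_of_mem _ hk')]
        simp [pvContains, Ne.symm hne]

-- L1: later combinations, all keys present in order
theorem pvFold_present (keys : List String) (c : List String) (cols : List (List String))
    (t₀ : List (String × List (String × List String)))
    (hn : keys.Nodup) (hlen : c.length = keys.length) (hcols : cols.length = keys.length)
    (hfresh : ∀ k ∈ keys, pvContains t₀ k = false) :
    (keys.zip c).foldl pvStep1 (t₀ ++ pvMk keys cols) = t₀ ++ pvMk keys (pvUpd cols c) := by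
  induction keys generalizing c cols t₀ with
  | nil => simp [pvMk, pvUpd]
  | cons k ks ih =>
    cases c with
    | nil => simp at hlen
    | cons v vs =>
      cases cols with
      | nil => simp at hcols
      | cons col colss =>
        have hk0 : pvContains t₀ k = false := hfresh k (by simp)
        have hmk : pvMk (k :: ks) (col :: colss) = (k, [("list", col)]) :: pvMk ks colss := rfl
        have hstep : pvStep1 (t₀ ++ pvMk (k :: ks) (col :: colss)) (k, v)
            = (t₀ ++ [(k, [("list", col ++ [v])])]) ++ pvMk ks colss := by
          unfold pvStep1
          have hc : pvContains (t₀ ++ pvMk (k :: ks) (col :: colss)) k = true := by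
            rw [pvContains_append]
            simp [hmk, pvContains]
          simp only [hc, if_true]
          rw [hmk, pvModify_append _ _ _ _ hk0]
          simp [pvModify, List.append_assoc]
        rw [List.zip_cons_cons, List.foldl_cons, hstep]
        rw [ih vs colss (t₀ ++ [(k, [("list", col ++ [v])])]) (List.nodup_cons.mp hn).2
          (by simpa using hlen) (by simpa using hcols) ?fresh]
        · simp [pvMk, pvUpd, List.append_assoc]
        case fresh =>
          intro k' hk'
          have hne : k' ≠ k := fun h => (List.nodup_cons.mp hn).1 (h ▸ hk')
          rw [pvContains_append, hfresh k' (List.mem_cons_of_mem _ hk')]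
          simp [pvContains, Ne.symm hne]

-- L2: the whole outer fold, given per-key columns as state
theorem pvFold_all (cs : List (List String)) (keys : List String) (cols : List (List String))
    (hn : keys.Nodup) (hcs : ∀ c ∈ cs, c.length = keys.length) (hcols : cols.length = keys.length) :
    cs.foldl (fun t c => (keys.zip c).foldl pvStep1 t) (pvMk keys cols)
      = pvMk keys (cs.foldl pvUpd cols) := by
  induction cs generalizing cols with
  | nil => simp
  | cons c cs ih =>
    rw [List.foldl_cons, List.foldl_cons]
    have h1 := pvFold_present keys c cols [] hn (hcs c (by simp)) hcols
      (by intro k hk; rfl)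
    simp only [List.nil_append] at h1
    rw [h1]
    exact ih (pvUpd cols c) (fun c' hc' => hcs c' (List.mem_cons_of_mem _ hc'))
      (by simp [pvUpd, List.length_zipWith, hcols, hcs c (by simp)])

-- B1: one block of the product (fixed head x)
theorem pvUpd_block (x : String) (P : List (List String)) (col : List String)
    (colss : List (List String)) :
    P.foldl (fun cs c => pvUpd cs (x :: c)) (col :: colss)
      = (col ++ List.replicate P.length x) :: P.foldl pvUpd colss := by
  induction P generalizing col colss with
  | nil => simp
  | cons c P ih =>
    rw [List.foldl_cons, List.foldl_cons]
    have h1 : pvUpd (col :: colss) (x :: c) = (col ++ [x]) :: pvUpd colss c := rfl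
    rw [h1, ih]
    simp [List.replicate_succ, List.append_assoc]

theorem pvZipNilLeft (n : Nat) (L : List (List String)) (h : L.length ≤ n) :
    List.zipWith (· ++ ·) (List.replicate n ([] : List String)) L = L := by
  induction L generalizing n with
  | nil => simp
  | cons a L ih =>
    cases n with
    | zero => simp at h
    | succ n => simp [List.replicate_succ, ih n (by simpa using h)]

theorem pvZipNilRight (cs : List (List String)) (n : Nat) (h : cs.length ≤ n) :
    List.zipWith (· ++ ·) cs (List.replicate n ([] : List String)) = cs := by
  induction cs generalizing n with
  | nil => simp
  | cons c cs ih =>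
    cases n with
    | zero => simp at h
    | succ n => simp [List.replicate_succ, ih n (by simpa using h)]

theorem pvZipWith_map (cs A : List (List String)) (g : List String → List String) :
    List.zipWith (· ++ ·) (List.zipWith (· ++ ·) cs A) (A.map g)
      = List.zipWith (· ++ ·) cs (A.map (fun co => co ++ g co)) := by
  induction cs generalizing A with
  | nil => simp
  | cons c cs ih =>
    cases A with
    | nil => simp
    | cons a A => simp [ih, List.append_assoc]

theorem pvUpd_replicate_nil (n : Nat) (c : List String) (h : c.length = n) :
    pvUpd (List.replicate n ([] : List String)) c = c.map (fun v => [v]) := by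
  induction c generalizing n with
  | nil => simp [pvUpd]
  | cons v vs ih =>
    cases n with
    | zero => simp at h
    | succ n =>
      have hh := ih n (by simpa using h)
      simp only [pvUpd] at hh ⊢
      simp [List.replicate_succ, hh]

theorem pvFoldl_flatMap {α β γ : Type} (l : List α) (g : α → List β) (f : γ → β → γ) (b : γ) :
    (l.flatMap g).foldl f b = l.foldl (fun b' x => (g x).foldl f b') b := by
  induction l generalizing b with
  | nil => rfl
  | cons x l ih => simp [List.flatMap_cons, List.foldl_append, ih]

-- the inner fold over one head value x, for every head in l
theorem pvFold_prod_aux (ls : List (List String))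
    (IH : ∀ cols, cols.length = ls.length →
      (pvProd ls).foldl pvUpd cols = List.zipWith (· ++ ·) cols (pvColA ls))
    (l : List String) : ∀ (col : List String) (colss : List (List String)),
    colss.length = ls.length →
    l.foldl (fun cs x => (pvProd ls).foldl (fun cs' c => pvUpd cs' (x :: c)) cs) (col :: colss)
      = (col ++ l.flatMap (fun x => List.replicate (pvProd ls).length x)) ::
          List.zipWith (· ++ ·) colss ((pvColA ls).map (fun co => l.flatMap (fun _ => co))) := by
  induction l with
  | nil =>
    intro col colss hc
    simp only [List.foldl_nil]
    have h2 : ((pvColA ls).map (fun co => ([] : List String).flatMap (fun _ => co)))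
        = List.replicate (pvColA ls).length [] := by
      simp [List.map_const']
    rw [show (([] : List String).flatMap (fun x => List.replicate (pvProd ls).length x)) = [] from rfl,
      List.append_nil, h2, pvZipNilRight colss _ (le_of_eq (by rw [pvColA_length]; exact hc))]
  | cons x l ihl =>
    intro col colss hc
    rw [List.foldl_cons, pvUpd_block, IH colss hc,
      ihl (col ++ List.replicate (pvProd ls).length x)
        (List.zipWith (· ++ ·) colss (pvColA ls))
        (by simp [List.length_zipWith, hc, pvColA_length])]
    congr 1
    · simp [List.flatMap_cons, List.append_assoc]
    · simp [pvZipWith_map, List.flatMap_cons]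

-- C1: folding the whole product appends exactly the closed-form columns
theorem pvFold_prod (ls : List (List String)) (cols : List (List String))
    (hcols : cols.length = ls.length) :
    (pvProd ls).foldl pvUpd cols = List.zipWith (· ++ ·) cols (pvColA ls) := by
  induction ls generalizing cols with
  | nil =>
    have : cols = [] := List.length_eq_zero_iff.mp (by simpa using hcols)
    subst this
    simp [pvProd, pvColA, pvUpd]
  | cons l ls ih =>
    cases cols with
    | nil => simp at hcols
    | cons col colss =>
      rw [show pvProd (l :: ls) = l.flatMap (fun x => (pvProd ls).map (fun c => x :: c)) from rfl]
      rw [pvFoldl_flatMap]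
      simp only [List.foldl_map]
      rw [pvFold_prod_aux ls (fun cols h => ih cols h) l col colss (by simpa using hcols)]
      simp [pvColA]

theorem pvFlatMap_const {α : Type} (m : List α) (X : List String) :
    m.flatMap (fun _ => X) = (List.replicate m.length X).flatten := by
  induction m with
  | nil => simp
  | cons a m ih => simp [ih, List.replicate_succ]

theorem pvFlattenRep_mul (a b : Nat) (co : List String) :
    (List.replicate a ((List.replicate b co).flatten)).flatten
      = (List.replicate (a * b) co).flatten := by
  induction a with
  | zero => simp
  | succ a ih =>
    rw [List.replicate_succ, List.flatten_cons, ih, Nat.succ_mul, Nat.add_comm,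
      List.replicate_add, List.flatten_append]

-- BF: Source B's loop, unrolled
theorem pvFoldB (sw : List (String × List String)) (tile : Nat)
    (out : List (String × List (String × List String)))
    (hne : ∀ p ∈ sw, p.2.length ≠ 0) :
    (sw.foldl pvStepB (pvPL (sw.map Prod.snd), tile, out)).2.2 = out ++ pvMkB sw tile := by
  induction sw generalizing tile out with
  | nil => simp [pvMkB]
  | cons p sw ih =>
    obtain ⟨k, l⟩ := p
    have hl : l.length ≠ 0 := hne (k, l) (by simp)
    have hpl : pvPL (((k, l) :: sw).map Prod.snd) = l.length * pvPL (sw.map Prod.snd) := by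
      simp [pvPL]
    rw [List.foldl_cons]
    have hstep : pvStepB (pvPL (((k, l) :: sw).map Prod.snd), tile, out) (k, l)
        = (pvPL (sw.map Prod.snd), tile * l.length,
            out ++ [(k, [("list", (List.replicate tile ()).flatMap
              (fun _ => l.flatMap (fun v => List.replicate (pvPL (sw.map Prod.snd)) v)))])]) := by
      unfold pvStepB
      simp only [hpl]
      rw [Nat.mul_div_cancel_left _ (Nat.pos_of_ne_zero hl)]
      simp [pvFlatMap_const, List.map_const']
    rw [hstep, ih (tile * l.length) _ (fun p hp => hne p (List.mem_cons_of_mem _ hp))]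
    simp [pvMkB, List.append_assoc]

-- MB: the closed-form columns are B's rows
theorem pvMk_colA (sw : List (String × List String)) (tile : Nat) :
    pvMk (sw.map Prod.fst)
        ((pvColA (sw.map Prod.snd)).map
          (fun col => (List.replicate tile ()).flatMap (fun _ => col)))
      = pvMkB sw tile := by
  induction sw generalizing tile with
  | nil => simp [pvMk, pvMkB, pvColA]
  | cons p sw ih =>
    obtain ⟨k, l⟩ := p
    have hwrap : ∀ co : List String,
        (List.replicate tile ()).flatMap (fun _ => l.flatMap (fun _ => co))
          = (List.replicate (tile * l.length) ()).flatMap (fun _ => co) := by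
      intro co
      simp only [pvFlatMap_const, List.length_replicate]
      exact pvFlattenRep_mul tile l.length co
    simp only [List.map_cons, pvColA, pvMkB]
    have hmk : ∀ (x : List String) xs,
        pvMk (k :: sw.map Prod.fst) (x :: xs) = (k, [("list", x)]) :: pvMk (sw.map Prod.fst) xs :=
      fun _ _ => rfl
    rw [hmk]
    congr 1
    · rw [pvProd_length]
    · rw [List.map_map]
      rw [show ((fun col => (List.replicate tile ()).flatMap (fun _ => col)) ∘
            (fun col : List String => l.flatMap (fun _ => col)))
          = (fun col : List String => (List.replicate (tile * l.length) ()).flatMap (fun _ => col)) from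
        funext (fun co => hwrap co)]
      exact ih (tile * l.length)

-- ===== VERDICT (by name: the statement is the Claim_ definition above) =====
theorem get_swap_combos_spec : Claim_equal_get_swap_combos := by
  intro swaps _ hpre
  have hnd : (swaps.map Prod.fst).Nodup := hpre
  show get_swap_combos swaps = get_swap_combos_alt swaps
  have htot : (swaps.map Prod.snd).foldl (fun a l => a * l.length) 1
      = pvPL (swaps.map Prod.snd) := by
    simp [pvPL, List.prod_eq_foldl, List.foldl_map]
  by_cases h0 : pvPL (swaps.map Prod.snd) = 0
  · have h0' : (swaps.map Prod.snd).foldl (fun a l => a * l.length) 1 = 0 := by rw [htot]; exact h0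
    have hnil : pvProd (swaps.map Prod.snd) = [] := by
      have hh := pvProd_length (swaps.map Prod.snd)
      rw [h0] at hh
      exact List.length_eq_zero_iff.mp hh
    have hA0 : get_swap_combos swaps = [] := by
      unfold get_swap_combos
      rw [hnil]
      rfl
    have hB0 : get_swap_combos_alt swaps = [] := by
      unfold get_swap_combos_alt
      rw [if_pos (Or.inl h0')]
    rw [hA0, hB0]
  · by_cases hsw : swaps = []
    · subst hsw
      rfl
    · have hne : ∀ p ∈ swaps, p.2.length ≠ 0 := by
        intro p hp hz
        exact h0 (by
          rw [pvPL]
          exact List.prod_eq_zero_iff.mpr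
            (List.mem_map.mpr ⟨p.2, List.mem_map_of_mem hp, hz⟩))
      obtain ⟨c₀, cs', hcs⟩ : ∃ c₀ cs', pvProd (swaps.map Prod.snd) = c₀ :: cs' := by
        cases hp : pvProd (swaps.map Prod.snd) with
        | nil =>
          exfalso
          apply h0
          rw [← pvProd_length, hp]
          rfl
        | cons a b => exact ⟨a, b, rfl⟩
      have hmemlen : ∀ c ∈ pvProd (swaps.map Prod.snd), c.length = (swaps.map Prod.fst).length := by
        intro c hc
        rw [pvProd_mem_length hc]
        simp
      have hc₀ : c₀.length = (swaps.map Prod.fst).length :=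
        hmemlen c₀ (by rw [hcs]; simp)
      have hA : get_swap_combos swaps = pvMk (swaps.map Prod.fst) (pvColA (swaps.map Prod.snd)) := by
        unfold get_swap_combos
        rw [List.foldl_map, hcs, List.foldl_cons]
        have h1 := pvFold_fresh (swaps.map Prod.fst) c₀ [] hnd hc₀ (by intro k hk; rfl)
        simp only [List.nil_append] at h1
        rw [h1]
        rw [pvFold_all cs' (swaps.map Prod.fst) (c₀.map (fun v => [v])) hnd
          (fun c hc => hmemlen c (by rw [hcs]; exact List.mem_cons_of_mem _ hc))
          (by simp [hc₀])]
        congr 1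
        have h2 := pvFold_prod (swaps.map Prod.snd)
          (List.replicate (swaps.map Prod.snd).length []) (by simp)
        rw [hcs, List.foldl_cons] at h2
        rw [pvUpd_replicate_nil (swaps.map Prod.snd).length c₀ (by rw [hc₀]; simp)] at h2
        rw [h2, pvZipNilLeft _ _ (le_of_eq (by rw [pvColA_length]))]
      have hB : get_swap_combos_alt swaps = pvMkB swaps 1 := by
        unfold get_swap_combos_alt
        have hk : swaps.map Prod.fst ≠ [] := by
          simpa [List.map_eq_nil_iff] using hsw
        rw [if_neg (not_or.mpr ⟨by rw [htot]; exact h0, hk⟩)]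
        rw [List.zip_map']
        simp only [Prod.mk.eta, List.map_id']
        rw [htot, pvFoldB swaps 1 [] hne]
        simp
      rw [hA, hB, ← pvMk_colA swaps 1]
      congr 1
      rw [show (fun (col : List String) => (List.replicate 1 ()).flatMap (fun _ => col))
          = (fun (col : List String) => col) from funext (fun co => by simp)]
      simp
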